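-- pv_equiv track=rewrite | github.com/2024-2-analitica-descriptiva/2024-2-PRE-03-ingestion-de-texto-plano-scuartasr | homework/pregunta_01.py | encontrar_segmentos
-- ===== SOURCE A (Python) =====
-- def encontrar_segmentos(texto: str) -> list:
--     """
--     Esta función recibe un string e identifica los diferentes segmentos
--     de texto, entendiendo como segmento de texto aquel que se encuentra
--     rodeado por dos o más espacios en blanco o un tabulador (no separa
--     si internamente se tiene solo un espacio entre palabra y palabra).
--     Retorna una lista con las posiciones del primer caracter de cada
--     segmento de texto
--     """
--     # Lista que almacenará las posiciones de texto
--     posiciones = []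
--
--     # Banderas dentro de la iteración
--     en_segmento = False
--     inicio_segmento = None
--     espacios_consecutivos = 0
--
--     # Iterando en la cadena de texto, conservando el índice y el elemento
--     for indice, elemento in enumerate(texto):
--         if elemento in (' ', '\t'):  # Contamos los espacios/tabulaciones consecutivos
--             espacios_consecutivos += 1
--         else:
--             # Si hay más de un espacio consecutivo y no nos encontramos en un
--             # segmento de texto...
--             if espacios_consecutivos > 1 and en_segmento:
--                 # ... guardamos la posición, porque es la primera de un segmento
--                 posiciones.append(inicio_segmento)
--                 en_segmento = False
--
--             espacios_consecutivos = 0  # Reiniciamos el contador de espacios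
--
--             if not en_segmento:  # Iniciamos un nuevo segmento
--                 inicio_segmento = indice
--                 en_segmento = True
--
--     if en_segmento:  # Si hay un segmento abierto al final del texto
--         posiciones.append(inicio_segmento)
--
--     return posiciones
-- ===== SOURCE B (Python) =====
-- def encontrar_segmentos(texto: str) -> list:
--     """B: stateless one-liner — a position i starts a segment iff it holds a
--     non-separator char and each of the (up to) two preceding chars is a
--     separator (segments are split only by runs of 2+ spaces/tabs)."""
--     seps = (' ', '\t')
--     return [
--         i
--         for i, c in enumerate(texto)
--         if c not in seps
--         and (i < 1 or texto[i - 1] in seps)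
--         and (i < 2 or texto[i - 2] in seps)
--     ]
-- ===== Notes on version B (the rewrite author's own statement) =====
-- stated objective: simpler
-- what changed: A's four-variable state machine (segment flag, pending start, consecutive-space counter, deferred appends) is replaced by a stateless single list comprehension: position i is a segment start iff it holds a non-separator character and each of its up to two preceding characters is a space or tab.
import Mathlib
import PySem

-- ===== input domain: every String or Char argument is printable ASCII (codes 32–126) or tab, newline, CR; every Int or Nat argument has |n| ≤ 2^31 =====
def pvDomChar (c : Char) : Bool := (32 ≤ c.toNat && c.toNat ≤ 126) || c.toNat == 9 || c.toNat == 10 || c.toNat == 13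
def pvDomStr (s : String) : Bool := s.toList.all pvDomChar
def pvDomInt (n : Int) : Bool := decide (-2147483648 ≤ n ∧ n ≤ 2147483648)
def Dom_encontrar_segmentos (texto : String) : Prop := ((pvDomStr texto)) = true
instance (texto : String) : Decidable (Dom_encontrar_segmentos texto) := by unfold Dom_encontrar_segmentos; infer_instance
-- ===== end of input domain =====

-- B replaces A's four-variable state machine by a stateless per-position test
-- (a position starts a segment iff it is non-separator and its up-to-two
-- predecessors are separators); objective: simpler. Equal cost, no speed claim.

-- ===== PORT A =====
-- separator test: elemento in (' ', '\t')
def pvIsSep (c : Char) : Bool := c = ' ' || c = '\t'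

-- one iteration of A's for-loop; state = (posiciones, en_segmento, inicio_segmento, espacios_consecutivos);
-- inicio_segmento is Python's None/int → Option Int; when appended en_segmento is true so it is always set
-- (getD 0 is never the None case on reachable states).
def pvStepA (st : List Int × Bool × Option Int × Int) (ic : Int × Char) :
    List Int × Bool × Option Int × Int :=
  let (pos, en, inicio, esp) := st
  if pvIsSep ic.2 then
    (pos, en, inicio, esp + 1)
  else
    let pos' := if esp > 1 ∧ en then pos ++ [inicio.getD 0] else pos
    let en' := if esp > 1 ∧ en then false else en
    -- espacios_consecutivos := 0, then: if not en_segmento, open a new segment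
    if ¬ en' then (pos', true, some ic.1, 0) else (pos', en', inicio, 0)

def encontrar_segmentos (texto : String) : List Int :=
  let st := (PySem.List.enumerate texto.toList).foldl pvStepA ([], false, none, 0)
  if st.2.1 then st.1 ++ [st.2.2.1.getD 0] else st.1

-- ===== PORT B =====
-- list comprehension over enumerate(texto); texto[i-1] / texto[i-2] via pyGet?
-- (guarded by i ≥ 1 / i ≥ 2, so the lookup is always in range and `.any` is the membership test).
def encontrar_segmentos_alt (texto : String) : List Int :=
  (PySem.List.enumerate texto.toList).filterMap fun ic =>
    if (!pvIsSep ic.2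
        && (decide (ic.1 < 1) || (PySem.List.pyGet? texto.toList (ic.1 - 1)).any pvIsSep)
        && (decide (ic.1 < 2) || (PySem.List.pyGet? texto.toList (ic.1 - 2)).any pvIsSep)) = true
    then some ic.1 else none

-- ===== PRECONDITION & SPEC =====
def Spec_encontrar_segmentos (texto : String) (out : List Int) : Prop := out = encontrar_segmentos_alt texto
instance (texto : String) (out : List Int) : Decidable (Spec_encontrar_segmentos texto out) := by unfold Spec_encontrar_segmentos; infer_instance

-- ===== CLAIM (what is proved, stated in full; the proofs are below) =====
def Claim_equal_encontrar_segmentos : Prop := ∀ (texto : String), Dom_encontrar_segmentos texto → Spec_encontrar_segmentos texto (encontrar_segmentos texto)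

-- ===== LEMMAS AND PROOFS =====

-- common reference function: walk the chars carrying (b1, b2) =
-- "previous char is a separator / out of range" and the same for the char two back;
-- emit index i when the current char is non-separator and both hold.
def pvG : List Char → Int → Bool → Bool → List Int
  | [], _, _, _ => []
  | c :: cs, i, b1, b2 =>
      (if (!pvIsSep c && b1 && b2) = true then [i] else []) ++ pvG cs (i + 1) (pvIsSep c) b1

theorem pvA_loop (cs : List Char) : ∀ (i : Int) (pos : List Int) (en : Bool)
    (inicio : Option Int) (esp : Int) (b1 b2 : Bool),
    0 ≤ esp →
    b1 = (!en || decide (1 ≤ esp)) →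
    (b1 = true → b2 = (!en || decide (2 ≤ esp))) →
    (let st := (PySem.List.enumerate cs i).foldl pvStepA (pos, en, inicio, esp)
     if st.2.1 then st.1 ++ [st.2.2.1.getD 0] else st.1)
      = pos ++ (if en then [inicio.getD 0] else []) ++ pvG cs i b1 b2 := by
  induction cs with
  | nil =>
      intro i pos en inicio esp b1 b2 _ _ _
      cases en <;> simp [PySem.List.enumerate_nil, pvG]
  | cons c cs ih =>
      intro i pos en inicio esp b1 b2 hesp hb1 hb2
      rw [PySem.List.enumerate_cons, List.foldl_cons]
      by_cases hc : pvIsSep c = true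
      · -- separator: esp += 1
        have hstep : pvStepA (pos, en, inicio, esp) (i, c) = (pos, en, inicio, esp + 1) := by
          simp [pvStepA, hc]
        rw [hstep, ih (i + 1) pos en inicio (esp + 1) true b1 (by omega)
              (by cases en <;> simp <;> omega)
              (by intro _; rw [hb1]; cases en <;> simp <;> omega)]
        simp [pvG, hc]
      · -- non-separator
        replace hc : pvIsSep c = false := by simpa using hc
        by_cases hcl : esp > 1 ∧ en = true
        · -- close the open segment, then open a new one at i
          have hstep : pvStepA (pos, en, inicio, esp) (i, c)
              = (pos ++ [inicio.getD 0], true, some i, 0) := by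
            simp [pvStepA, hc, hcl.1, hcl.2]
          have hb1t : b1 = true := by rw [hb1, hcl.2]; simp; omega
          have hb2t : b2 = true := by rw [hb2 hb1t, hcl.2]; simp; omega
          rw [hstep, ih (i + 1) (pos ++ [inicio.getD 0]) true (some i) 0 false b1
                le_rfl (by simp) (by intro h; simp at h)]
          simp [pvG, hc, hb1t, hb2t, hcl.2]
        · by_cases hen : en = true
          · -- inside a segment, not enough spaces to close: state only resets esp
            have hle : esp ≤ 1 := by rcases not_and_or.mp hcl with h | h; omega; simp [hen] at h
            have hstep : pvStepA (pos, en, inicio, esp) (i, c) = (pos, true, inicio, 0) := by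
              simp [pvStepA, hc, hen, show ¬(1 < esp) from by omega]
            rw [hstep, ih (i + 1) pos true inicio 0 false b1
                  le_rfl (by simp) (by intro h; simp at h)]
            simp only [pvG, hc, hen]
            simp
            intro hb1t
            rw [hb2 hb1t, hen]
            simp
            omega
          · -- before the first segment: open one at i
            replace hen : en = false := by simpa using hen
            have hstep : pvStepA (pos, en, inicio, esp) (i, c) = (pos, true, some i, 0) := by
              simp [pvStepA, hc, hen]
            have hb1t : b1 = true := by simp [hb1, hen]
            have hb2t : b2 = true := by simp [hb2 hb1t, hen]
            rw [hstep, ih (i + 1) pos true (some i) 0 false b1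
                  le_rfl (by simp) (by intro h; simp at h)]
            simp [pvG, hc, hen, hb1t, hb2t]

theorem pvB_suffix : ∀ (suf pre : List Char) (l : List Char), l = pre ++ suf →
    (PySem.List.enumerate suf (pre.length : Int)).filterMap (fun ic =>
        if (!pvIsSep ic.2
            && (decide (ic.1 < 1) || (PySem.List.pyGet? l (ic.1 - 1)).any pvIsSep)
            && (decide (ic.1 < 2) || (PySem.List.pyGet? l (ic.1 - 2)).any pvIsSep)) = true
        then some ic.1 else none)
      = pvG suf (pre.length : Int)
          (decide ((pre.length : Int) < 1) || (PySem.List.pyGet? l ((pre.length : Int) - 1)).any pvIsSep)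
          (decide ((pre.length : Int) < 2) || (PySem.List.pyGet? l ((pre.length : Int) - 2)).any pvIsSep) := by
  intro suf
  induction suf with
  | nil => intro pre l _; simp [PySem.List.enumerate_nil, pvG]
  | cons c cs ih =>
      intro pre l hl
      rw [PySem.List.enumerate_cons, List.filterMap_cons]
      have hget : PySem.List.pyGet? l (pre.length : Int) = some c := by
        rw [hl]; exact PySem.List.pyGet?_append_length pre cs c
      have hnext := ih (pre ++ [c]) l (by simp [hl])
      have hlen : ((pre ++ [c]).length : Int) = (pre.length : Int) + 1 := by simp
      rw [hlen] at hnext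
      have h1 : (decide ((pre.length : Int) + 1 < 1)
            || (PySem.List.pyGet? l ((pre.length : Int) + 1 - 1)).any pvIsSep) = pvIsSep c := by
        have e : (pre.length : Int) + 1 - 1 = (pre.length : Int) := by ring
        rw [e, hget]
        simp [Option.any, show ¬((pre.length : Int) + 1 < 1) from by omega]
      have h2 : ((pre.length : Int) + 1 < 2) ↔ ((pre.length : Int) < 1) := by omega
      have h3 : (pre.length : Int) + 1 - 2 = (pre.length : Int) - 1 := by ring
      rw [h3] at hnext
      simp only [h1, h2] at hnext
      by_cases he : (!pvIsSep c
          && (decide ((pre.length : Int) < 1) || (PySem.List.pyGet? l ((pre.length : Int) - 1)).any pvIsSep)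
          && (decide ((pre.length : Int) < 2) || (PySem.List.pyGet? l ((pre.length : Int) - 2)).any pvIsSep)) = true
      · rw [if_pos he, hnext]
        simp only [pvG]
        rw [if_pos he]
        simp
      · rw [if_neg he, hnext]
        simp only [pvG]
        rw [if_neg he]
        simp

-- ===== VERDICT (by name: the statement is the Claim_ definition above) =====
theorem encontrar_segmentos_spec : Claim_equal_encontrar_segmentos := by
  intro texto _
  unfold Spec_encontrar_segmentos encontrar_segmentos encontrar_segmentos_alt
  have hA := pvA_loop texto.toList 0 [] false none 0 true true le_rfl (by simp)
      (by intro _; simp)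
  have hB := pvB_suffix texto.toList [] texto.toList (by simp)
  simp only [List.length_nil, Nat.cast_zero] at hB
  have h01 : (decide ((0:Int) < 1) || (PySem.List.pyGet? texto.toList ((0:Int) - 1)).any pvIsSep) = true := by simp
  have h02 : (decide ((0:Int) < 2) || (PySem.List.pyGet? texto.toList ((0:Int) - 2)).any pvIsSep) = true := by simp
  rw [h01, h02] at hB
  rw [hB]
  simpa using hA
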